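-- pv_equiv track=rewrite | github.com/sissoux/LipOpenSink_passive | firmware/code.py | _parse_major_minor
-- ===== SOURCE A (Python) =====
-- def _parse_major_minor(vs: str) -> tuple:
--     major = 0
--     minor = 0
--     try:
--         tokens = vs.replace("-", ".").split(".")
--         for tok in tokens:
--             try:
--                 val = int(tok)
--             except Exception:
--                 continue
--             if major == 0:
--                 major = val
--             elif minor == 0:
--                 minor = val
--                 break
--     except Exception:
--         pass
--     return major, minor
-- ===== SOURCE B (Python) =====
-- def _parse_major_minor(vs: str) -> tuple:
--     try:
--         vals = []
--         for tok in vs.replace("-", ".").split("."):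
--             try:
--                 vals.append(int(tok))
--             except Exception:
--                 pass
--         for i, v in enumerate(vals):
--             if v != 0:
--                 return v, (vals[i + 1] if i + 1 < len(vals) else 0)
--         return 0, 0
--     except Exception:
--         return 0, 0
-- ===== Notes on version B (the rewrite author's own statement) =====
-- stated objective: alternative
-- what changed: Replaced the single-pass early-exit accumulator (mutable major/minor updated while scanning tokens) by a two-phase shape: first build the full list of parseable ints, then index into it at the first nonzero entry for major and the following entry for minor.
import Mathlib
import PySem

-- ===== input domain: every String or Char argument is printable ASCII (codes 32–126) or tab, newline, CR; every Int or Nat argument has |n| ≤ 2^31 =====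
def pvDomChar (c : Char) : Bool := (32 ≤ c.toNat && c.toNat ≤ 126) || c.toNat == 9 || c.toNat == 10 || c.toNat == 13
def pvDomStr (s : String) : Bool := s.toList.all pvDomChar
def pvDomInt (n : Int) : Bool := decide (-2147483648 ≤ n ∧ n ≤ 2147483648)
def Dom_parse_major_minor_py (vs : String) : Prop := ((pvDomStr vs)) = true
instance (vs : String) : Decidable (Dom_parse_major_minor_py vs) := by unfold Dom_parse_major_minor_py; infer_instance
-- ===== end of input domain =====

-- B builds the full list of parseable ints and indexes into it (first nonzero entry and its
-- successor) instead of A's single-pass early-exit mutable accumulator; same cost ("alternative").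

-- ===== PORT A =====
-- the for-loop over tokens with mutable major/minor and break
def pmLoopA : List String → Int → Int → Int × Int
  | [], major, minor => (major, minor)
  | tok :: rest, major, minor =>
    match PySem.Int.ofStr? tok with
    | none => pmLoopA rest major minor          -- except: continue
    | some val =>
      if major = 0 then pmLoopA rest val minor
      else if minor = 0 then (major, val)       -- minor = val; break
      else pmLoopA rest major minor

def parse_major_minor_py (vs : String) : Int × Int :=
  pmLoopA (((PySem.Str.split? (PySem.Str.replace vs "-" ".") ".").getD [])) 0 0

-- ===== PORT B =====
-- first loop of Source B: vals.append(int(tok)) for each parseable token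
def pmValsAux : List String → List Int → List Int
  | [], acc => acc
  | tok :: rest, acc =>
    match PySem.Int.ofStr? tok with
    | some v => pmValsAux rest (acc ++ [v])
    | none => pmValsAux rest acc

-- second loop of Source B: first nonzero entry and the entry after it (the rest's head is vals[i+1])
def pmFind : List Int → Int × Int
  | [] => (0, 0)
  | v :: rest => if v ≠ 0 then (v, match rest with | [] => 0 | w :: _ => w) else pmFind rest

def parse_major_minor_py_alt (vs : String) : Int × Int :=
  pmFind (pmValsAux (((PySem.Str.split? (PySem.Str.replace vs "-" ".") ".").getD [])) [])

-- ===== PRECONDITION & SPEC =====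
def Spec_parse_major_minor_py (vs : String) (out : Int × Int) : Prop := out = parse_major_minor_py_alt vs
instance (vs : String) (out : Int × Int) : Decidable (Spec_parse_major_minor_py vs out) := by unfold Spec_parse_major_minor_py; infer_instance

-- ===== CLAIM (what is proved, stated in full; the proofs are below) =====
def Claim_equal_parse_major_minor_py : Prop := ∀ (vs : String), Dom_parse_major_minor_py vs → Spec_parse_major_minor_py vs (parse_major_minor_py vs)

-- ===== LEMMAS AND PROOFS =====

theorem pmValsAux_eq (toks : List String) (acc : List Int) :
    pmValsAux toks acc = acc ++ toks.filterMap PySem.Int.ofStr? := by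
  induction toks generalizing acc with
  | nil => simp [pmValsAux]
  | cons tok rest ih =>
    cases h : PySem.Int.ofStr? tok with
    | none => simp [pmValsAux, h, ih]
    | some v => simp [pmValsAux, h, ih]

theorem pmLoopA_major (toks : List String) (major : Int) (h : major ≠ 0) :
    pmLoopA toks major 0 = (major, (toks.filterMap PySem.Int.ofStr?).headD 0) := by
  induction toks with
  | nil => simp [pmLoopA]
  | cons tok rest ih =>
    cases hp : PySem.Int.ofStr? tok with
    | none => simp [pmLoopA, hp, ih]
    | some v => simp [pmLoopA, hp, h]

theorem pmLoopA_zero (toks : List String) :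
    pmLoopA toks 0 0 = pmFind (toks.filterMap PySem.Int.ofStr?) := by
  induction toks with
  | nil => simp [pmLoopA, pmFind]
  | cons tok rest ih =>
    cases hp : PySem.Int.ofStr? tok with
    | none => simp [pmLoopA, hp, ih]
    | some v =>
      by_cases hv : v = 0
      · simp [pmLoopA, hp, hv, ih, pmFind]
      · simp only [pmLoopA, hp]
        rw [pmLoopA_major rest v hv, List.filterMap_cons, hp]
        simp only [pmFind, if_pos hv]
        generalize rest.filterMap PySem.Int.ofStr? = l
        cases l <;> simp

-- ===== VERDICT (by name: the statement is the Claim_ definition above) =====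
theorem parse_major_minor_py_spec : Claim_equal_parse_major_minor_py := by
  intro vs _
  unfold Spec_parse_major_minor_py parse_major_minor_py parse_major_minor_py_alt
  rw [pmValsAux_eq, pmLoopA_zero]
  simp
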